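-- pv_equiv track=rewrite | github.com/kyzhouhzau/NLPGNN | nlpgnn/datas/graphloader.py | map_edge2index
-- ===== SOURCE A (Python) =====
-- def map_edge2index(edge_type_num, k=5):
--     new_edge_type_index = {}
--     index_set = {0}
--     for key, value in edge_type_num.items():
--         if value > k:
--             new_edge_type_index[key] = len(index_set)
--             index_set.add(len(index_set))
--         else:
--             new_edge_type_index[key] = 0
--     return new_edge_type_index
-- ===== SOURCE B (Python) =====
-- def map_edge2index(edge_type_num, k=5):
--     items = list(edge_type_num.items())
--     return {key: (sum(1 for _, v in items[:i + 1] if v > k) if value > k else 0)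
--             for i, (key, value) in enumerate(items)}
-- ===== Notes on version B (the rewrite author's own statement) =====
-- stated objective: alternative
-- what changed: A threads mutable state (a dict under construction and a growing set whose length is the next index) through one loop; B keeps no running state at all: each qualifying key's index is computed independently as the count of qualifying entries in the prefix of the item list up to and including it, trading the O(n) stateful loop for stateless O(n^2) per-element prefix counts.
import Mathlib
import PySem

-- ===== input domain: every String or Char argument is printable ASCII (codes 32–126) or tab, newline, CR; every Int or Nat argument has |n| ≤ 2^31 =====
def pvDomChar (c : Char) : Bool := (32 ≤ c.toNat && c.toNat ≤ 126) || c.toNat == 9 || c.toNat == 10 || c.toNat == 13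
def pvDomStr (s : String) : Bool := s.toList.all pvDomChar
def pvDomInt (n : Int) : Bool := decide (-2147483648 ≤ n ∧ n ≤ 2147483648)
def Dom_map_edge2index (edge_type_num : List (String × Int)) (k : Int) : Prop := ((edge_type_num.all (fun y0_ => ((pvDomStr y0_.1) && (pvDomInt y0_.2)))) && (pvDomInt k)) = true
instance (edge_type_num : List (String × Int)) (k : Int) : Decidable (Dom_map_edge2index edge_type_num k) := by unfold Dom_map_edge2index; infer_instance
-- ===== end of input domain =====

-- B replaces A's stateful loop (a dict under construction plus a growing set whose length is the
-- next index) by a stateless per-element formula: a qualifying key's index is the count of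
-- qualifying entries in the prefix up to and including it (objective: alternative).

-- ===== PORT A =====
-- the for-loop over edge_type_num.items(), carrying the dict being built and index_set
def mapA_loop (k : Int) : List (String × Int) → PySem.Dict String Int → PySem.Set Int → PySem.Dict String Int
  | [], d, _ => d
  | (key, value) :: rest, d, s =>
    if k < value then
      mapA_loop k rest (d.insert key (Int.ofNat s.length)) (PySem.Set.add s (Int.ofNat s.length))
    else
      mapA_loop k rest (d.insert key 0) s

def map_edge2index (edge_type_num : List (String × Int)) (k : Int) : List (String × Int) :=
  (mapA_loop k edge_type_num PySem.Dict.empty (PySem.Set.ofList [0])).items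

-- ===== PORT B =====
def map_edge2index_alt (edge_type_num : List (String × Int)) (k : Int) : List (String × Int) :=
  (PySem.List.enumerate edge_type_num 0).map (fun p =>
    (p.2.1,
      if k < p.2.2 then
        ((PySem.List.slice edge_type_num none (some (p.1 + 1))).countP
          (fun kv => decide (k < kv.2)) : Int)
      else 0))

-- ===== PRECONDITION & SPEC =====
-- Pre_ excludes association lists with duplicate keys: edge_type_num is a Python dict, whose
-- representation as a list of pairs has distinct keys; a duplicate-key list represents no dict
-- (Python would have collapsed the duplicates before map_edge2index ever ran).
def Pre_map_edge2index (edge_type_num : List (String × Int)) (k : Int) : Prop :=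
  (edge_type_num.map Prod.fst).Nodup
instance (edge_type_num : List (String × Int)) (k : Int) : Decidable (Pre_map_edge2index edge_type_num k) := by unfold Pre_map_edge2index; infer_instance

def pvWitness_map_edge2index : (List (String × Int)) × Int :=
  ([("likes", 7), ("knows", 2), ("cites", 9)], 5)

def Spec_map_edge2index (edge_type_num : List (String × Int)) (k : Int) (out : List (String × Int)) : Prop := out = map_edge2index_alt edge_type_num k
instance (edge_type_num : List (String × Int)) (k : Int) (out : List (String × Int)) : Decidable (Spec_map_edge2index edge_type_num k out) := by unfold Spec_map_edge2index; infer_instance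

-- ===== CLAIM (what is proved, stated in full; the proofs are below) =====
def Claim_equal_map_edge2index : Prop := ∀ (edge_type_num : List (String × Int)) (k : Int), Dom_map_edge2index edge_type_num k → Pre_map_edge2index edge_type_num k → Spec_map_edge2index edge_type_num k (map_edge2index edge_type_num k)

-- ===== LEMMAS AND PROOFS =====

-- reference run: one pass, explicit counter c = next index to hand out
def specRun (k : Int) : List (String × Int) → Int → List (String × Int)
  | [], _ => []
  | (key, value) :: rest, c =>
    if k < value then (key, c) :: specRun k rest (c + 1) else (key, 0) :: specRun k rest c

lemma set_add_fresh (s : PySem.Set Int) (x : Int) (h : x ∉ s) : PySem.Set.add s x = s ++ [x] := by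
  simp [PySem.Set.add, PySem.Set.contains, h]

lemma mapA_items (k : Int) : ∀ (l : List (String × Int)) (d : PySem.Dict String Int) (s : PySem.Set Int),
    (l.map Prod.fst).Nodup →
    (∀ key ∈ l.map Prod.fst, d.contains key = false) →
    (∀ x ∈ s, x < (s.length : Int)) →
    (mapA_loop k l d s).items = d.items ++ specRun k l (s.length : Int) := by
  intro l
  induction l with
  | nil => intro d s _ _ _; simp [mapA_loop, specRun]
  | cons kv rest ih =>
    obtain ⟨key, value⟩ := kv
    intro d s hnd hfresh hs
    simp only [List.map_cons, List.nodup_cons] at hnd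
    have hkey : d.contains key = false := hfresh key (by simp)
    have hrest : ∀ key' ∈ rest.map Prod.fst, key' ≠ key := by
      intro key' h' heq; exact hnd.1 (heq ▸ h')
    by_cases hv : k < value
    · have hmem : (Int.ofNat s.length) ∉ s := fun hm => absurd (hs _ hm) (by simp)
      have hadd : PySem.Set.add s (Int.ofNat s.length) = s ++ [Int.ofNat s.length] :=
        set_add_fresh s _ hmem
      have hstep := ih (d.insert key (Int.ofNat s.length)) (PySem.Set.add s (Int.ofNat s.length))
        hnd.2
        (by intro key' h'
            rw [PySem.Dict.contains_insert]
            simp [hrest key' h', hfresh key' (by simp [h'])])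
        (by intro x hx
            rw [hadd] at hx ⊢
            simp at hx ⊢
            rcases hx with hx | hx
            · have := hs x hx; omega
            · omega)
      simp only [mapA_loop, if_pos hv]
      rw [hstep, PySem.Dict.items_insert_of_not_contains d _ hkey, hadd]
      simp only [specRun, if_pos hv, List.length_append, List.length_cons, List.length_nil]
      push_cast
      simp
    · have hstep := ih (d.insert key 0) s hnd.2
        (by intro key' h'
            rw [PySem.Dict.contains_insert]
            simp [hrest key' h', hfresh key' (by simp [h'])])
        hs
      simp only [mapA_loop, if_neg hv, hstep,
        PySem.Dict.items_insert_of_not_contains d _ hkey, specRun]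
      simp [List.append_assoc]

-- B's stateless prefix-count map, generalised over an already-consumed prefix acc, equals specRun
lemma B_gen (k : Int) : ∀ (l acc : List (String × Int)),
    (PySem.List.enumerate l (acc.length : Int)).map (fun p =>
      (p.2.1,
        if k < p.2.2 then
          ((PySem.List.slice (acc ++ l) none (some (p.1 + 1))).countP
            (fun kv => decide (k < kv.2)) : Int)
        else 0))
    = specRun k l ((acc.countP (fun kv => decide (k < kv.2)) : Int) + 1) := by
  intro l
  induction l with
  | nil => intro acc; simp [PySem.List.enumerate_nil, specRun]
  | cons kv rest ih =>
    obtain ⟨key, value⟩ := kv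
    intro acc
    rw [PySem.List.enumerate_cons]
    simp only [List.map_cons]
    have hslice : PySem.List.slice (acc ++ (key, value) :: rest) none (some ((acc.length : Int) + 1))
        = acc ++ [(key, value)] := by
      have : ((acc.length : Int) + 1) = ((acc.length + 1 : Nat) : Int) := by push_cast; ring
      rw [this, PySem.List.slice_to_natCast,
        show acc ++ (key, value) :: rest = (acc ++ [(key, value)]) ++ rest from by simp,
        List.take_append_of_le_length (by simp)]
      simp
    have htail := ih (acc ++ [(key, value)])
    have hlen : ((acc ++ [(key, value)]).length : Int) = (acc.length : Int) + 1 := by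
      simp
    have hlist : (acc ++ [(key, value)]) ++ rest = acc ++ (key, value) :: rest := by
      simp
    rw [hlen, hlist] at htail
    by_cases hv : k < value
    · have hcount : ((acc ++ [(key, value)]).countP (fun kv => decide (k < kv.2)) : Int)
          = (acc.countP (fun kv => decide (k < kv.2)) : Int) + 1 := by
        rw [List.countP_append]
        simp [hv]
      rw [hcount] at htail
      simp only [specRun, if_pos hv, hslice]
      rw [htail, hcount]
    · have hcount : ((acc ++ [(key, value)]).countP (fun kv => decide (k < kv.2)) : Int)
          = (acc.countP (fun kv => decide (k < kv.2)) : Int) := by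
        rw [List.countP_append]
        simp [hv]
      rw [hcount] at htail
      simp only [specRun, if_neg hv]
      rw [htail]

lemma altEqSpecRun (edge_type_num : List (String × Int)) (k : Int) :
    map_edge2index_alt edge_type_num k = specRun k edge_type_num 1 := by
  have h := B_gen k edge_type_num []
  simpa [map_edge2index_alt] using h

-- ===== VERDICT (by name: the statement is the Claim_ definition above) =====
theorem map_edge2index_spec : Claim_equal_map_edge2index := by
  intro edge_type_num k _ hpre
  unfold Spec_map_edge2index
  unfold Pre_map_edge2index at hpre
  rw [altEqSpecRun edge_type_num k]
  unfold map_edge2index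
  rw [mapA_items k edge_type_num PySem.Dict.empty (PySem.Set.ofList [0]) hpre
    (by intro key _; rfl)
    (by intro x hx
        have h0 : (PySem.Set.ofList [(0:Int)]) = [0] := by decide
        rw [h0] at hx ⊢
        simp at hx
        simp [hx])]
  rfl
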